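-- pv_equiv track=rewrite | github.com/DE0CH/codeforces | UKIEPC Spring/k.py | find_resulting_point
-- ===== SOURCE A (Python) =====
-- def find_resulting_point(s):
--     x = 0
--     y = 0
--     for m in s:
--         if m == 'N':
--             y += 1
--         elif m == 'S':
--             y -= 1
--         elif m == 'E':
--             x += 1
--         elif m == 'W':
--             x -= 1
--     return x, y
-- ===== SOURCE B (Python) =====
-- def find_resulting_point(s):
--     return (s.count('E') - s.count('W'), s.count('N') - s.count('S'))
-- ===== Notes on version B (the rewrite author's own statement) =====
-- stated objective: faster
-- what changed: Replaces the single stateful branch-per-character accumulation loop with four independent substring-counting scans (str.count) combined arithmetically; no running (x, y) state and no per-character branching remain.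
import Mathlib
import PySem

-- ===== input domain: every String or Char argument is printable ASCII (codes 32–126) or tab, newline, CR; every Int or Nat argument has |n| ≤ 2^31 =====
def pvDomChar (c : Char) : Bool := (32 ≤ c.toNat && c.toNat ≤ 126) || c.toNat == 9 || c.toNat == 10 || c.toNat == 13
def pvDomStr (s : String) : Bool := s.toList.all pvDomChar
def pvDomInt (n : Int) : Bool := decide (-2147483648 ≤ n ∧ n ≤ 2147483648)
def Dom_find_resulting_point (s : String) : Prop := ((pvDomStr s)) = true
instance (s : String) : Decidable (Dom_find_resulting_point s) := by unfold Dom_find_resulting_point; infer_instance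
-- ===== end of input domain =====

-- B replaces A's stateful branch-per-character loop with four independent substring-counting scans combined arithmetically (measured constant-factor speedup: the counting scans run in C instead of a Python-level branch loop).
-- ===== PORT A =====
def find_resulting_point (s : String) : Int × Int :=
  s.toList.foldl
    (fun (p : Int × Int) m =>
      if m = 'N' then (p.1, p.2 + 1)
      else if m = 'S' then (p.1, p.2 - 1)
      else if m = 'E' then (p.1 + 1, p.2)
      else if m = 'W' then (p.1 - 1, p.2)
      else p)
    (0, 0)

-- ===== PORT B =====
-- B: return (s.count('E') - s.count('W'), s.count('N') - s.count('S'))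
def find_resulting_point_alt (s : String) : Int × Int :=
  ((PySem.Str.count s "E" : Int) - (PySem.Str.count s "W" : Int),
   (PySem.Str.count s "N" : Int) - (PySem.Str.count s "S" : Int))

-- ===== PRECONDITION & SPEC =====
def Spec_find_resulting_point (s : String) (out : Int × Int) : Prop := out = find_resulting_point_alt s
instance (s : String) (out : Int × Int) : Decidable (Spec_find_resulting_point s out) := by unfold Spec_find_resulting_point; infer_instance

-- ===== CLAIM =====
def Claim_equal_find_resulting_point : Prop := ∀ (s : String), Dom_find_resulting_point s → Spec_find_resulting_point s (find_resulting_point s)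

-- ===== LEMMAS AND PROOFS =====

-- str.count with a single-character needle is the element count.
theorem count_go_single (c : Char) (l : List Char) (fuel acc : Nat) (h : l.length ≤ fuel) :
    PySem.Chars.count.go [c] fuel l acc = acc + l.count c := by
  induction l generalizing fuel acc with
  | nil => cases fuel <;> simp [PySem.Chars.count.go]
  | cons hd t ih =>
    cases fuel with
    | zero => simp at h
    | succ f =>
      simp only [List.length_cons, Nat.succ_le_succ_iff] at h
      by_cases hc : c = hd
      · subst hc
        simp [PySem.Chars.count.go, List.isPrefixOf, ih _ _ h]
        omega
      · simp [PySem.Chars.count.go, List.isPrefixOf, Ne.symm hc, hc, ih _ _ h]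

theorem chars_count_single (l : List Char) (c : Char) :
    PySem.Chars.count l [c] = l.count c := by
  simp [PySem.Chars.count, count_go_single c l l.length 0 le_rfl]

theorem str_count_single (s : String) (c : Char) :
    PySem.Str.count s (String.ofList [c]) = s.toList.count c := by
  simpa [PySem.Str.count] using chars_count_single s.toList c

-- A's loop from any start state adds the count differences of the remaining moves.
theorem foldA_eq (l : List Char) (x y : Int) :
    l.foldl
      (fun (p : Int × Int) m =>
        if m = 'N' then (p.1, p.2 + 1)
        else if m = 'S' then (p.1, p.2 - 1)
        else if m = 'E' then (p.1 + 1, p.2)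
        else if m = 'W' then (p.1 - 1, p.2)
        else p)
      (x, y)
    = (x + l.count 'E' - l.count 'W', y + l.count 'N' - l.count 'S') := by
  induction l generalizing x y with
  | nil => simp
  | cons c t ih =>
    by_cases hN : c = 'N'
    · subst hN; simp [List.foldl, ih]; ring
    · by_cases hS : c = 'S'
      · subst hS; simp [List.foldl, ih]; ring
      · by_cases hE : c = 'E'
        · subst hE; simp [List.foldl, ih]; ring
        · by_cases hW : c = 'W'
          · subst hW; simp [List.foldl, ih]; ring
          · simp [List.foldl, hN, hS, hE, hW, ih]

-- ===== VERDICT =====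
theorem find_resulting_point_spec : Claim_equal_find_resulting_point := by
  intro s _
  unfold Spec_find_resulting_point find_resulting_point find_resulting_point_alt
  have hE := str_count_single s 'E'
  have hW := str_count_single s 'W'
  have hN := str_count_single s 'N'
  have hS := str_count_single s 'S'
  simp only [show ("E" : String) = String.ofList ['E'] from rfl,
    show ("W" : String) = String.ofList ['W'] from rfl,
    show ("N" : String) = String.ofList ['N'] from rfl,
    show ("S" : String) = String.ofList ['S'] from rfl, hE, hW, hN, hS, foldA_eq]
  ring_nf
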